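-- pv_equiv track=rewrite | github.com/peterkost/Advent-of-Code-2023 | day05/part1.py | getInputMapsAsList
-- ===== SOURCE A (Python) =====
-- from typing import List, Tuple
--
-- def getInputMapsAsList(lines: List[str]) -> List[List[int]]:
--     res = []
--     i = 0
--     while i < len(lines):
--         curMap = []
--
--         while i < len(lines) and lines[i]:
--             if lines[i][0].isnumeric():
--                 lineAsInt = [int(strNum) for strNum in lines[i].split()]
--                 curMap.append(lineAsInt)
--             i += 1
--         i += 1
--         res.append(curMap)
--     return res
-- ===== SOURCE B (Python) =====
-- def getInputMapsAsList(lines):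
--     # Staged passes: (1) locate all blank-line separators, (2) slice the line list
--     # into blocks between separators, (3) drop the phantom trailing block that only
--     # exists when the input is empty or ends with a blank line, (4) parse each block.
--     seps = [i for i, line in enumerate(lines) if not line]
--     starts = [0] + [i + 1 for i in seps]
--     ends = seps + [len(lines)]
--     blocks = [lines[s:e] for s, e in zip(starts, ends)]
--     if not lines or not lines[-1]:
--         blocks.pop()
--     return [[[int(tok) for tok in line.split()] for line in block if line[0].isnumeric()]
--             for block in blocks]
-- ===== Notes on version B (the rewrite author's own statement) =====
-- stated objective: alternative
-- what changed: Replaces A's nested index-walking while loops by a staged pipeline: first compute all blank-line separator positions, then slice the line list into blocks between separators (dropping the phantom trailing block when input is empty or ends blank), then parse each block with a comprehension.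
import Mathlib
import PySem

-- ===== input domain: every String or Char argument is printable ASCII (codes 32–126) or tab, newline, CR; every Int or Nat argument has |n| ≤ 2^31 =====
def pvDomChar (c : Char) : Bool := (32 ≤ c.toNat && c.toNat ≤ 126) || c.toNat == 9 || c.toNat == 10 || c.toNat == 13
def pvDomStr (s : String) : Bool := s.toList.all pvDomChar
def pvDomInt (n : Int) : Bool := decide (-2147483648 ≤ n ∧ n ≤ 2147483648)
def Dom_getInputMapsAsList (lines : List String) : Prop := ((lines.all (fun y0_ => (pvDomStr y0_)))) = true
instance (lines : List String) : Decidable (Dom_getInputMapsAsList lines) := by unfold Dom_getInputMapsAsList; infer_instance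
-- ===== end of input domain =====

-- B replaces A's nested index-walking while loops by a staged pipeline
-- (separator positions -> slices between them -> parse each block); same value.

-- shared line primitives: both Pythons test line[0].isnumeric() and compute
-- [int(tok) for tok in line.split()].  On the printable-ASCII domain a single
-- character is numeric exactly when it is a digit '0'-'9'.
def pvNumStart (line : String) : Bool :=
  match line.toList with
  | c :: _ => PySem.Chars.isdigit c
  | [] => false

-- [int(tok) for tok in line.split()]; int() failure (= ValueError, excluded by Pre_) defaults to 0
def pvParseLine (line : String) : List Int :=
  (PySem.Str.split₀ line).map (fun t => (PySem.Int.ofStr? t).getD 0)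

-- ===== PORT A =====
-- inner while: consumes lines[i..] while nonempty; returns (#lines consumed, final curMap)
def pvInnerA (lines : List String) (i : Nat) (curMap : List (List Int)) :
    Nat × List (List Int) :=
  if h : i < lines.length then
    if lines[i] != "" then
      let curMap' := if pvNumStart lines[i] then curMap ++ [pvParseLine lines[i]] else curMap
      let r := pvInnerA lines (i + 1) curMap'
      (r.1 + 1, r.2)
    else (0, curMap)
  else (0, curMap)
termination_by lines.length - i

-- outer while
def pvOuterA (lines : List String) (i : Nat) (res : List (List (List Int))) :
    List (List (List Int)) :=
  if _h : i < lines.length then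
    let r := pvInnerA lines i []
    pvOuterA lines (i + r.1 + 1) (res ++ [r.2])
  else res
termination_by lines.length - i
decreasing_by omega

def getInputMapsAsList (lines : List String) : List (List (List Int)) :=
  pvOuterA lines 0 []

-- ===== PORT B =====
-- pass 1: [i for i, line in enumerate(lines) if not line]
def pvSepsB (lines : List String) : List Int :=
  (PySem.List.enumerate lines 0).filterMap
    (fun p => if p.2 == "" then some p.1 else none)

-- pass 2: [lines[s:e] for s, e in zip([0]+[i+1 for i in seps], seps+[len(lines)])]
def pvMkBlocks (lines : List String) (seps : List Int) : List (List String) :=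
  ((0 :: seps.map (· + 1)).zip (seps ++ [(lines.length : Int)])).map
    (fun p => PySem.List.slice lines (some p.1) (some p.2))

def pvBlocksB (lines : List String) : List (List String) :=
  pvMkBlocks lines (pvSepsB lines)

-- pass 4: the per-block parse comprehension
def pvParseBlock (block : List String) : List (List Int) :=
  (block.filter (fun line => pvNumStart line)).map pvParseLine

def getInputMapsAsList_alt (lines : List String) : List (List (List Int)) :=
  let blocks := pvBlocksB lines
  -- pass 3: 'if not lines or not lines[-1]: blocks.pop()' — blocks is provably
  -- nonempty and the popped value is unused, so .pop() is dropLast here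
  let blocks :=
    match lines.getLast? with
    | none => blocks.dropLast
    | some l => if l == "" then blocks.dropLast else blocks
  blocks.map pvParseBlock

-- ===== PRECONDITION & SPEC =====
-- Pre_ excludes exactly the inputs on which A raises ValueError: a line whose first
-- character is a digit but some whitespace-split token of it is not a valid int().
def Pre_getInputMapsAsList (lines : List String) : Prop :=
  ∀ l ∈ lines, pvNumStart l = true →
    ∀ t ∈ PySem.Str.split₀ l, (PySem.Int.ofStr? t).isSome = true
instance (lines : List String) : Decidable (Pre_getInputMapsAsList lines) := by
  unfold Pre_getInputMapsAsList; infer_instance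

def pvWitness_getInputMapsAsList : List String :=
  ["seeds: 79 14", "", "seed-to-soil map:", "50 98 2", "52 50 48", "", "x"]

def Spec_getInputMapsAsList (lines : List String) (out : List (List (List Int))) : Prop := out = getInputMapsAsList_alt lines
instance (lines : List String) (out : List (List (List Int))) : Decidable (Spec_getInputMapsAsList lines out) := by unfold Spec_getInputMapsAsList; infer_instance

-- ===== CLAIM (what is proved, stated in full; the proofs are below) =====
def Claim_equal_getInputMapsAsList : Prop := ∀ (lines : List String), Dom_getInputMapsAsList lines → Pre_getInputMapsAsList lines → Spec_getInputMapsAsList lines (getInputMapsAsList lines)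

-- ===== LEMMAS AND PROOFS =====

-- the digit-starting lines of a block, parsed (= pvParseBlock, kept for A's side)
def pvGroup (t : List String) : List (List Int) :=
  (t.filter (fun line => pvNumStart line)).map pvParseLine

def pvP (l : String) : Bool := l != ""

-- group-by-blank recursion A's port is reduced to
def pvOuterL (ls : List String) : List (List (List Int)) :=
  if h : ls = [] then []
  else
    pvGroup (ls.takeWhile pvP) :: pvOuterL (ls.drop ((ls.takeWhile pvP).length + 1))
termination_by ls.length
decreasing_by
  have : 0 < ls.length := List.length_pos_iff.mpr h
  simp [List.length_drop]; omega

lemma pvInnerA_eq (lines : List String) :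
    ∀ n i curMap, lines.length - i ≤ n →
      pvInnerA lines i curMap =
        (((lines.drop i).takeWhile pvP).length,
          curMap ++ pvGroup ((lines.drop i).takeWhile pvP)) := by
  intro n
  induction n with
  | zero =>
    intro i curMap h
    have hi : lines.length ≤ i := by omega
    have hd : lines.drop i = [] := List.drop_eq_nil_of_le hi
    rw [pvInnerA, hd]
    simp [pvGroup, Nat.not_lt.mpr hi]
  | succ n ih =>
    intro i curMap h
    rw [pvInnerA]
    by_cases hi : i < lines.length
    · have hd : lines.drop i = lines[i] :: lines.drop (i + 1) :=
        List.drop_eq_getElem_cons hi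
      by_cases he : lines[i] = ""
      · simp [hi, he, hd, pvP, pvGroup]
      · have hne : (lines[i] != "") = true := by simp [he]
        simp only [hi, dif_pos, hne, if_pos]
        rw [ih (i + 1) _ (by omega)]
        simp only [hd, List.takeWhile_cons, pvP, hne, if_pos]
        by_cases hn : pvNumStart lines[i]
        · simp [hn, pvGroup]
        · simp [hn, pvGroup]
    · have hd : lines.drop i = [] := List.drop_eq_nil_of_le (Nat.not_lt.mp hi)
      rw [hd]
      simp [hi, pvGroup]

lemma pvOuterA_eq (lines : List String) :
    ∀ n i res, lines.length - i ≤ n →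
      pvOuterA lines i res = res ++ pvOuterL (lines.drop i) := by
  intro n
  induction n with
  | zero =>
    intro i res h
    have hi : lines.length ≤ i := by omega
    have hd : lines.drop i = [] := List.drop_eq_nil_of_le hi
    rw [pvOuterA, pvOuterL]
    simp [Nat.not_lt.mpr hi, hd]
  | succ n ih =>
    intro i res h
    rw [pvOuterA]
    by_cases hi : i < lines.length
    · simp only [hi, dif_pos]
      rw [pvInnerA_eq lines (lines.length - i) i [] le_rfl]
      rw [ih (i + ((lines.drop i).takeWhile pvP).length + 1) _ (by omega)]
      conv_rhs => rw [pvOuterL]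
      have hne : lines.drop i ≠ [] := by
        simp only [ne_eq, List.drop_eq_nil_iff]; omega
      simp only [hne, dif_neg, not_false_iff, List.nil_append, List.append_assoc,
        List.singleton_append]
      congr 2
      simp only [List.drop_drop, Nat.add_assoc]
    · have hd : lines.drop i = [] := List.drop_eq_nil_of_le (Nat.not_lt.mp hi)
      rw [pvOuterL]
      simp [hi, hd]

-- ===== B side: the staged pipeline computes the same block decomposition =====

-- reference block decomposition (always len(seps)+1 blocks, so never [])
def pvF0 : List String → List (List String)
  | [] => [[]]
  | l :: r =>
    if l = "" then [] :: pvF0 r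
    else
      match pvF0 r with
      | [] => [[l]]        -- unreachable: pvF0 never returns []
      | b0 :: bs => (l :: b0) :: bs

lemma pvF0_ne_nil (ls : List String) : pvF0 ls ≠ [] := by
  cases ls with
  | nil => simp [pvF0]
  | cons l r =>
    by_cases h : l = ""
    · simp [pvF0, h]
    · cases hr : pvF0 r <;> simp [pvF0, h, hr]

lemma pvSepsB_cons (l : String) (r : List String) :
    pvSepsB (l :: r) =
      (if l = "" then [(0 : Int)] else []) ++ (pvSepsB r).map (· + 1) := by
  have shift : ∀ (r : List String) (s : Int),
      (PySem.List.enumerate r (s + 1)).filterMap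
        (fun p => if p.2 == "" then some p.1 else none) =
      ((PySem.List.enumerate r s).filterMap
        (fun p => if p.2 == "" then some p.1 else none)).map (· + 1) := by
    intro r
    induction r with
    | nil => intro s; simp [PySem.List.enumerate_nil]
    | cons x t ih =>
      intro s
      rw [PySem.List.enumerate_cons, PySem.List.enumerate_cons]
      have h' := ih (s + 1)
      simp only [beq_iff_eq] at h' ⊢
      by_cases hx : x = "" <;> simp [hx, h']
  unfold pvSepsB
  rw [PySem.List.enumerate_cons]
  have hs := shift r 0
  norm_num at hs
  simp only [beq_iff_eq] at hs ⊢
  by_cases h : l = "" <;> simp [h, hs]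

lemma pvSepsB_nonneg (ls : List String) : ∀ x ∈ pvSepsB ls, 0 ≤ x := by
  intro x hx
  unfold pvSepsB at hx
  obtain ⟨p, hp, hpx⟩ := List.mem_filterMap.mp hx
  obtain ⟨k, hk, rfl⟩ := (PySem.List.mem_enumerate_iff _ _ _).mp hp
  by_cases hb : ls[k] == "" <;> simp [hb] at hpx
  omega

-- shifting both slice bounds by one on a cons skips the head
lemma pvSliceShift (l : String) (r : List String) (a b : Int)
    (ha : 0 ≤ a) (hb : 0 ≤ b) :
    PySem.List.slice (l :: r) (some (a + 1)) (some (b + 1)) =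
      PySem.List.slice r (some a) (some b) := by
  rw [PySem.List.slice_toNat _ (by omega) (by omega),
      PySem.List.slice_toNat _ ha hb]
  have h1 : (a + 1).toNat = a.toNat + 1 := by omega
  have h2 : (b + 1).toNat = b.toNat + 1 := by omega
  rw [h1, h2]
  simp [List.drop_succ_cons]

lemma pvSliceHead (l : String) (r : List String) (b : Int) (hb : 0 ≤ b) :
    PySem.List.slice (l :: r) (some 0) (some (b + 1)) =
      l :: PySem.List.slice r (some 0) (some b) := by
  rw [PySem.List.slice_toNat _ le_rfl (by omega),
      PySem.List.slice_toNat _ le_rfl hb]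
  have h2 : (b + 1).toNat = b.toNat + 1 := by omega
  simp [h2, List.take_succ_cons]

lemma pvSliceNil {α : Type} (xs : List α) :
    PySem.List.slice xs (some 0) (some 0) = [] := by
  rw [PySem.List.slice_toNat _ le_rfl le_rfl]; simp

-- the slices taken at shifted positions of (l :: r) are the slices of r
lemma pvZipShift (l : String) (r : List String) (as bs : List Int)
    (ha : ∀ x ∈ as, 0 ≤ x) (hb : ∀ x ∈ bs, 0 ≤ x) :
    ((as.map (· + 1)).zip (bs.map (· + 1))).map
        (fun p => PySem.List.slice (l :: r) (some p.1) (some p.2)) =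
      (as.zip bs).map (fun p => PySem.List.slice r (some p.1) (some p.2)) := by
  rw [List.zip_map, List.map_map]
  apply List.map_congr_left
  intro p hp
  obtain ⟨h1, h2⟩ := List.of_mem_zip hp
  simp only [Function.comp, Prod.map]
  exact pvSliceShift l r p.1 p.2 (ha _ h1) (hb _ h2)

lemma pvEndsShift (l : String) (r : List String) (S : List Int) :
    S.map (· + 1) ++ [((l :: r).length : Int)] =
      (S ++ [(r.length : Int)]).map (· + 1) := by
  rw [List.map_append]
  simp [List.length_cons]

lemma pvMkBlocks_zero (l : String) (r : List String) (S : List Int)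
    (hS : ∀ x ∈ S, 0 ≤ x) :
    pvMkBlocks (l :: r) (0 :: S.map (· + 1)) = [] :: pvMkBlocks r S := by
  have hnnS : ∀ x ∈ (0 : Int) :: S.map (· + 1), 0 ≤ x := by
    intro x hx
    rcases List.mem_cons.mp hx with h | h
    · omega
    · obtain ⟨y, hy, rfl⟩ := List.mem_map.mp h
      have := hS y hy; omega
  have hnnE : ∀ x ∈ S ++ [(r.length : Int)], 0 ≤ x := by
    intro x hx
    rcases List.mem_append.mp hx with h | h
    · exact hS x h
    · simp at h; omega
  unfold pvMkBlocks
  rw [List.map_cons, List.cons_append, List.zip_cons_cons, List.map_cons,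
    pvSliceNil]
  congr 1
  have hz := pvZipShift l r ((0 : Int) :: S.map (· + 1))
    (S ++ [(r.length : Int)]) hnnS hnnE
  simpa [List.length_cons] using hz

lemma pvMkBlocks_ne_nil (r : List String) (S : List Int) : pvMkBlocks r S ≠ [] := by
  unfold pvMkBlocks
  rcases hE : S ++ [(r.length : Int)] with _ | ⟨e0, E'⟩
  · exact absurd hE (by simp)
  · simp [List.zip_cons_cons]

lemma pvMkBlocks_shift (l : String) (r : List String) (S : List Int)
    (hS : ∀ x ∈ S, 0 ≤ x) (b0 : List String) (bs : List (List String))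
    (hB : pvMkBlocks r S = b0 :: bs) :
    pvMkBlocks (l :: r) (S.map (· + 1)) = (l :: b0) :: bs := by
  have hnnE : ∀ x ∈ S ++ [(r.length : Int)], 0 ≤ x := by
    intro x hx
    rcases List.mem_append.mp hx with h | h
    · exact hS x h
    · simp at h; omega
  have hnnS1 : ∀ x ∈ S.map (· + 1), 0 ≤ x := by
    intro x hx
    obtain ⟨y, hy, rfl⟩ := List.mem_map.mp hx
    have := hS y hy; omega
  rcases hE : S ++ [(r.length : Int)] with _ | ⟨e0, E'⟩
  · exact absurd hE (by simp)
  have he0 : 0 ≤ e0 := hnnE e0 (by rw [hE]; simp)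
  have hE' : ∀ x ∈ E', 0 ≤ x := fun x hx => hnnE x (by rw [hE]; simp [hx])
  have hrhs : pvMkBlocks r S =
      PySem.List.slice r (some 0) (some e0) ::
        ((S.map (· + 1)).zip E').map
          (fun p => PySem.List.slice r (some p.1) (some p.2)) := by
    unfold pvMkBlocks
    rw [hE, List.zip_cons_cons, List.map_cons]
  rw [hrhs] at hB
  obtain ⟨h1, h2⟩ := List.cons_eq_cons.mp hB
  unfold pvMkBlocks
  rw [pvEndsShift, hE, List.map_cons, List.zip_cons_cons, List.map_cons,
    pvSliceHead l r e0 he0, pvZipShift l r _ _ hnnS1 hE', h1, h2]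
-- one step of the pipeline on a cons
lemma pvBlocksB_cons (l : String) (r : List String) :
    pvBlocksB (l :: r) =
      if l = "" then [] :: pvBlocksB r
      else
        match pvBlocksB r with
        | [] => [[l]]            -- unreachable: pvBlocksB is never []
        | b0 :: bs => (l :: b0) :: bs := by
  have hnn := pvSepsB_nonneg r
  by_cases h : l = ""
  · rw [if_pos h]
    unfold pvBlocksB
    rw [pvSepsB_cons, if_pos h, List.singleton_append]
    exact pvMkBlocks_zero l r _ hnn
  · rw [if_neg h]
    rcases hB : pvBlocksB r with _ | ⟨b0, bs⟩
    · exact absurd hB (pvMkBlocks_ne_nil r _)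
    · show pvBlocksB (l :: r) = (l :: b0) :: bs
      unfold pvBlocksB
      rw [pvSepsB_cons, if_neg h, List.nil_append]
      exact pvMkBlocks_shift l r _ hnn b0 bs hB

-- pvBlocksB computes pvF0
lemma pvBlocksB_eq_F0 (ls : List String) : pvBlocksB ls = pvF0 ls := by
  induction ls with
  | nil =>
    unfold pvBlocksB pvMkBlocks pvSepsB pvF0
    rw [PySem.List.enumerate_nil]
    simp only [List.filterMap_nil, List.map_nil, List.nil_append, List.length_nil,
      Nat.cast_zero, List.zip_cons_cons, List.zip_nil_right, List.map_cons,
      List.map_nil]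
    rw [pvSliceNil]
  | cons l r ih =>
    rw [pvBlocksB_cons, pvF0, ih]

lemma pvF0_no_blank (ls : List String) (h : ∀ l ∈ ls, l ≠ "") : pvF0 ls = [ls] := by
  induction ls with
  | nil => rfl
  | cons l r ih =>
    have hl : l ≠ "" := h l (by simp)
    rw [pvF0, if_neg hl, ih (fun x hx => h x (by simp [hx]))]

lemma pvF0_append_blank (t rest : List String) (ht : ∀ l ∈ t, l ≠ "") :
    pvF0 (t ++ "" :: rest) = t :: pvF0 rest := by
  induction t with
  | nil => simp [pvF0]
  | cons x t' ih =>
    have hx : x ≠ "" := ht x (by simp)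
    rw [List.cons_append, pvF0, if_neg hx, ih (fun y hy => ht y (by simp [hy]))]

-- the popped pipeline output equals pvOuterL
def pvPopped (ls : List String) : List (List String) :=
  match ls.getLast? with
  | none => (pvF0 ls).dropLast
  | some l => if l == "" then (pvF0 ls).dropLast else pvF0 ls

lemma pvPopped_eq (ls : List String) : (pvPopped ls).map pvGroup = pvOuterL ls := by
  induction hn : ls.length using Nat.strong_induction_on generalizing ls with
  | _ n ih =>
  by_cases h0 : ls = []
  · subst h0; simp [pvPopped, pvF0, pvOuterL]
  · obtain ⟨t, ht⟩ : ∃ t, ls.takeWhile pvP = t := ⟨_, rfl⟩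
    have htw : ∀ l ∈ t, l ≠ "" := by
      intro l hl
      have := List.mem_takeWhile_imp (ht ▸ hl)
      simpa [pvP] using this
    rcases hd : ls.dropWhile pvP with _ | ⟨d, rest⟩
    · -- no blank line: ls = t
      have hls : t = ls := by
        rw [← ht, ← List.takeWhile_append_dropWhile (p := pvP) (l := ls), hd,
          List.append_nil, List.takeWhile_eq_self_iff.mpr]
        intro x hx
        exact List.mem_takeWhile_imp hx
      have hall : ∀ l ∈ ls, l ≠ "" := hls ▸ htw
      rcases hl : ls.getLast? with _ | ⟨last⟩
      · exact absurd (List.getLast?_eq_none_iff.mp hl) h0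
      · have hlast : last ≠ "" := hall last (List.mem_of_getLast? hl)
        have hle : (last == "") = false := by simpa using hlast
        rw [pvPopped]
        simp only [hl, hle, Bool.false_eq_true, if_false]
        rw [pvF0_no_blank ls hall]
        rw [pvOuterL]
        simp only [h0, dif_neg, not_false_iff, ht, hls]
        have hdr : ls.drop (ls.length + 1) = [] := List.drop_eq_nil_of_le (by omega)
        rw [hls] at *
        rw [hdr, pvOuterL]
        simp
    · -- a blank exists: d = "" and ls = t ++ "" :: rest
      have hdne : pvP d = false := by
        have hne : ls.dropWhile pvP ≠ [] := by simp [hd]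
        have hh := List.head_dropWhile_not pvP hne
        have : (ls.dropWhile pvP).head hne = d := by simp [hd]
        rw [this] at hh
        simpa using hh
      have hde : d = "" := by simpa [pvP] using hdne
      subst hde
      have hsplit : ls = t ++ "" :: rest := by
        rw [← ht, ← hd, List.takeWhile_append_dropWhile]
      have hdrop : ls.drop (t.length + 1) = rest := by
        conv_lhs => rw [hsplit]
        rw [show t ++ "" :: rest = (t ++ [""]) ++ rest by simp,
          show t.length + 1 = (t ++ [""]).length by simp,
          List.drop_left]
      have hF0 : pvF0 ls = t :: pvF0 rest := by
        rw [hsplit]; exact pvF0_append_blank t rest htw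
      have hrlen : rest.length < n := by
        have : ls.length = t.length + 1 + rest.length := by
          conv_lhs => rw [hsplit]
          simp
          omega
        omega
      have houter : pvOuterL ls = pvGroup t :: pvOuterL rest := by
        rw [pvOuterL]
        simp only [h0, dif_neg, not_false_iff, ht, hdrop]
      rcases hr0 : rest with _ | ⟨r, rs⟩
      · -- the blank is the last line: drop the trailing empty block
        subst hr0
        have hl : ls.getLast? = some "" := by
          rw [hsplit, List.getLast?_append_cons]; rfl
        rw [pvPopped]
        simp only [hl, BEq.rfl, if_true]
        rw [hF0]
        simp [pvF0, houter, pvOuterL]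
      · -- lines continue after the blank
        have hl : ls.getLast? = (r :: rs).getLast? := by
          rw [hsplit, hr0, List.getLast?_append_cons, List.getLast?_cons_cons]
        have hstep : pvPopped ls = t :: pvPopped (r :: rs) := by
          rw [pvPopped, pvPopped, hl, hF0, hr0]
          rcases hlr : (r :: rs).getLast? with _ | ⟨last⟩
          · simp at hlr
          · by_cases hb : last = ""
            · simp only [hb, BEq.rfl, if_true]
              exact List.dropLast_cons_of_ne_nil (pvF0_ne_nil (r :: rs))
            · have : (last == "") = false := by simpa using hb
              simp [this]
        rw [hstep, List.map_cons, ih (r :: rs).length (by rw [← hr0]; omega) _ rfl]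
        rw [houter, hr0]

-- ===== VERDICT (by name: the statement is the Claim_ definition above) =====
theorem getInputMapsAsList_spec : Claim_equal_getInputMapsAsList := by
  intro lines _ _
  unfold Spec_getInputMapsAsList getInputMapsAsList
  rw [pvOuterA_eq lines lines.length 0 [] (Nat.sub_le _ _)]
  have halt : getInputMapsAsList_alt lines = (pvPopped lines).map pvGroup := by
    unfold getInputMapsAsList_alt pvPopped
    rw [pvBlocksB_eq_F0, show pvParseBlock = pvGroup from rfl]
  rw [halt, pvPopped_eq]
  simp
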